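-- pv_equiv track=rewrite | github.com/gabrielonishi/sturpy-lang | prepro.py | clean_comments
-- ===== SOURCE A (Python) =====
-- def clean_comments(code_str: str) -> str:
--     '''
--     Removes comments
--     '''
--     clean_raw = ''
--     i = 0
--     while i < len(code_str):
--         if code_str[i] == '#':
--             while code_str[i] != '\n':
--                 i += 1
--                 if i == len(code_str):
--                     break
--
--         else:
--             clean_raw += code_str[i]
--             i += 1
--
--     return clean_raw
-- ===== SOURCE B (Python) =====
-- def clean_comments(code_str: str) -> str:
--     '''
--     Removes comments
--     '''
--     lines = []
--     for line in code_str.split('\n'):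
--         idx = line.find('#')
--         lines.append(line if idx == -1 else line[:idx])
--     return '\n'.join(lines)
-- ===== Notes on version B (the rewrite author's own statement) =====
-- stated objective: idiomatic
-- what changed: Replaced the char-by-char index-walking while loop (with a nested comment-skipping inner while) by a split-then-map decomposition: split on '\n', cut each line at its first '#' via find/slice, rejoin with '\n'.
import Mathlib
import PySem

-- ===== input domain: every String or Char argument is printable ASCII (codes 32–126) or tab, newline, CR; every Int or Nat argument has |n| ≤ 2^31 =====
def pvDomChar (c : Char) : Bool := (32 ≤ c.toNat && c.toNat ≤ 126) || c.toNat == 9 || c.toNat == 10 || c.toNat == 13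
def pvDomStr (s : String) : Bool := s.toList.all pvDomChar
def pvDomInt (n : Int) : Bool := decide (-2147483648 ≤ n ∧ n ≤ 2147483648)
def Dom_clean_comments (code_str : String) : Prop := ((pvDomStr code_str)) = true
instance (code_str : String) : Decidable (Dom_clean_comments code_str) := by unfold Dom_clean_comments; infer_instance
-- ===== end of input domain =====

-- B replaces A's char-by-char index-walking loop (with its nested comment-skipping
-- inner while) by an idiomatic split-on-'\n' / cut-each-line-at-'#' / rejoin decomposition.

-- ===== PORT A =====
-- A's outer while: on '#' the inner while advances i until '\n' (kept) or end of string;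
-- otherwise the character is appended and i advances.
def cleanCommentsLoop : List Char → List Char
  | [] => []
  | c :: rest =>
    if c = '#' then
      cleanCommentsLoop (rest.dropWhile (fun x => x != '\n'))
    else
      c :: cleanCommentsLoop rest
termination_by l => l.length
decreasing_by
  · simp only [List.length_cons]
    exact Nat.lt_succ_of_le (List.length_dropWhile_le _ _)
  · simp

def clean_comments (code_str : String) : String :=
  String.ofList (cleanCommentsLoop code_str.toList)

-- ===== PORT B =====
-- Source B: for each line of code_str.split('\n'), keep line if line.find('#') == -1
-- else line[:idx]; then '\n'.join(...)  (split? is total here: the separator "\n" ≠ "").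
def clean_comments_alt (code_str : String) : String :=
  PySem.Str.join "\n"
    (((PySem.Str.split? code_str "\n").getD []).map (fun line =>
      if PySem.Str.find line "#" = -1 then line
      else PySem.Str.slice line none (some (PySem.Str.find line "#"))))

-- ===== PRECONDITION & SPEC =====
def Spec_clean_comments (code_str : String) (out : String) : Prop := out = clean_comments_alt code_str
instance (code_str : String) (out : String) : Decidable (Spec_clean_comments code_str out) := by unfold Spec_clean_comments; infer_instance

-- ===== CLAIM (what is proved, stated in full; the proofs are below) =====
def Claim_equal_clean_comments : Prop := ∀ (code_str : String), Dom_clean_comments code_str → Spec_clean_comments code_str (clean_comments code_str)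

-- ===== LEMMAS AND PROOFS =====

-- the character kept per line by B (the prefix before the first '#')
def pvTk (cs : List Char) : List Char := cs.takeWhile (fun c => c != '#')

-- specification of Python's split('\n') as a structural recursion
def pvFsplit : List Char → List (List Char)
  | [] => [[]]
  | c :: r => if c = '\n' then [] :: pvFsplit r else (pvFsplit r).modifyHead (c :: ·)

lemma pvFsplit_ne_nil (l : List Char) : pvFsplit l ≠ [] := by
  induction l with
  | nil => simp [pvFsplit]
  | cons c r ih =>
    simp only [pvFsplit]
    split
    · simp
    · cases h : pvFsplit r with
      | nil => exact absurd h ih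
      | cons hd tl => simp [List.modifyHead]

lemma splitOn_go_eq : ∀ (fuel : Nat) (l cur acc : _), l.length < fuel →
    PySem.Chars.splitOn.go ['\n'] fuel l cur acc
      = acc.reverse ++ (pvFsplit l).modifyHead (cur.reverse ++ ·) := by
  intro fuel
  induction fuel with
  | zero => intro l cur acc h; omega
  | succ n ih =>
    intro l cur acc h
    cases l with
    | nil => simp [PySem.Chars.splitOn.go, pvFsplit]
    | cons c rest =>
      by_cases hc : c = '\n'
      · subst hc
        have hpre : List.isPrefixOf ['\n'] ('\n' :: rest) = true := by
          simp [List.isPrefixOf]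
        rw [PySem.Chars.splitOn.go]
        simp only [hpre, if_pos, List.length_cons]
        have hlen : rest.length < n := by simpa using Nat.lt_of_succ_lt_succ h
        have hd1 : List.drop (([] : List Char).length + 1) ('\n' :: rest) = rest := rfl
        rw [hd1]
        rw [ih rest [] (cur.reverse :: acc) hlen]
        obtain ⟨hd, tl, hft⟩ : ∃ hd tl, pvFsplit rest = hd :: tl := by
          cases hf : pvFsplit rest with
          | nil => exact absurd hf (pvFsplit_ne_nil rest)
          | cons a b => exact ⟨a, b, rfl⟩
        simp [pvFsplit, hft, List.modifyHead]
      · have hpre : List.isPrefixOf ['\n'] (c :: rest) = false := by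
          simp [List.isPrefixOf]
          intro h'; exact absurd h'.symm hc
        rw [PySem.Chars.splitOn.go]
        simp only [hpre, Bool.false_eq_true, if_false]
        have hlen : rest.length < n := by simpa using Nat.lt_of_succ_lt_succ h
        rw [ih rest (c :: cur) acc hlen]
        obtain ⟨hd, tl, hft⟩ : ∃ hd tl, pvFsplit rest = hd :: tl := by
          cases hf : pvFsplit rest with
          | nil => exact absurd hf (pvFsplit_ne_nil rest)
          | cons a b => exact ⟨a, b, rfl⟩
        simp [pvFsplit, hc, hft, List.modifyHead]

lemma splitOn_nl (l : List Char) : PySem.Chars.splitOn l ['\n'] = pvFsplit l := by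
  have h := splitOn_go_eq (l.length + 1) l [] [] (by omega)
  obtain ⟨hd, tl, hft⟩ : ∃ hd tl, pvFsplit l = hd :: tl := by
    cases hf : pvFsplit l with
    | nil => exact absurd hf (pvFsplit_ne_nil l)
    | cons a b => exact ⟨a, b, rfl⟩
  simpa [PySem.Chars.splitOn, hft, List.modifyHead] using h

-- B's per-line cut (find/slice) is exactly takeWhile (≠ '#')
lemma takeWhile_eq_take_of (cs : List Char) : ∀ (n : Nat) (hn : n < cs.length),
    (∀ i (hi : i < n), cs[i]'(by omega) != '#') → cs[n] = '#' →
    cs.takeWhile (fun c => c != '#') = cs.take n := by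
  induction cs with
  | nil => intro n hn; simp at hn
  | cons c r ih =>
    intro n hn hbefore hat
    cases n with
    | zero =>
      simp only [List.getElem_cons_zero] at hat
      simp [List.takeWhile, hat]
    | succ m =>
      have hc : c != '#' := hbefore 0 (by omega)
      simp only [List.takeWhile, hc, List.take]
      rw [ih m (by simpa using Nat.lt_of_succ_lt_succ hn)
        (fun i hi => by simpa using hbefore (i + 1) (by omega))
        (by simpa using hat)]

lemma cut_eq_takeWhile (cs : List Char) :
    (if PySem.Chars.find cs ['#'] = -1 then cs
     else PySem.Chars.slice cs none (some (PySem.Chars.find cs ['#'])))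
    = cs.takeWhile (fun c => c != '#') := by
  by_cases h : PySem.Chars.find cs ['#'] = -1
  · rw [if_pos h]
    have hni : ¬ (['#'] <:+: cs) := (PySem.Chars.find_eq_neg_one_iff cs ['#']).mp h
    have hmem : '#' ∉ cs := by
      intro hm
      obtain ⟨s, t, rfl⟩ := List.append_of_mem hm
      exact hni ⟨s, t, by simp⟩
    symm
    rw [List.takeWhile_eq_self_iff]
    intro a ha
    rw [bne_iff_ne]
    intro he
    exact hmem (he ▸ ha)
  · rw [if_neg h]
    have h0 : 0 ≤ PySem.Chars.find cs ['#'] := by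
      have := PySem.Chars.neg_one_le_find cs ['#']
      omega
    obtain ⟨hpre, hmin⟩ := PySem.Chars.find_spec h0
    set n := (PySem.Chars.find cs ['#']).toNat with hn
    obtain ⟨t, ht⟩ : ∃ t, cs.drop n = '#' :: t := by
      obtain ⟨t, ht⟩ := hpre
      exact ⟨t, by simpa using ht.symm⟩
    have hnlt : n < cs.length := by
      by_contra hge
      have : cs.drop n = [] := List.drop_eq_nil_of_le (by omega)
      simp [this] at ht
    have hat : cs[n] = '#' := by
      have := List.drop_eq_getElem_cons hnlt
      rw [this] at ht
      exact (List.cons.injEq _ _ _ _ ▸ ht).1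
    have hbefore : ∀ i (hi : i < n), cs[i]'(by omega) != '#' := by
      intro i hi
      have hne : ¬ (['#'] <+: cs.drop i) := hmin i hi
      by_contra hb
      have hii : cs[i]'(by omega) = '#' := by simpa using hb
      have : cs.drop i = '#' :: cs.drop (i + 1) := by
        rw [List.drop_eq_getElem_cons (by omega), hii]
      exact hne ⟨cs.drop (i + 1), by simp [this]⟩
    rw [PySem.Chars.slice, PySem.List.slice_to cs h0,
      takeWhile_eq_take_of cs n hnlt hbefore hat, hn]

lemma mapTk_eq (r : List Char) :
    ∃ hd tl, pvFsplit r = hd :: tl := by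
  cases hf : pvFsplit r with
  | nil => exact absurd hf (pvFsplit_ne_nil r)
  | cons a b => exact ⟨a, b, rfl⟩

lemma join_head_cons (x : Char) (cs : List Char) (rest : List (List Char)) :
    PySem.Chars.join ['\n'] ((x :: cs) :: rest) = x :: PySem.Chars.join ['\n'] (cs :: rest) := by
  cases rest with
  | nil => simp [PySem.Chars.join_singleton]
  | cons b bs => rw [PySem.Chars.join_cons_cons, PySem.Chars.join_cons_cons]; simp

-- a '#'-opened chunk contributes nothing: B's value at '#'::r only depends on the tail chunks
lemma G_sharp (r : List Char) :
    PySem.Chars.join ['\n'] ((pvFsplit ('#' :: r)).map pvTk)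
      = PySem.Chars.join ['\n'] ([] :: (pvFsplit r).tail.map pvTk) := by
  obtain ⟨hd, tl, hft⟩ := mapTk_eq r
  simp [pvFsplit, hft, List.modifyHead, pvTk, List.takeWhile]

lemma G_skip (r : List Char) :
    PySem.Chars.join ['\n'] ((pvFsplit ('#' :: r)).map pvTk)
      = PySem.Chars.join ['\n'] ((pvFsplit (r.dropWhile (fun x => x != '\n'))).map pvTk) := by
  induction r with
  | nil =>
    simp [pvFsplit, List.modifyHead, pvTk, List.takeWhile, PySem.Chars.join_singleton]
  | cons c t ih =>
    by_cases hc : c = '\n'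
    · subst hc
      rw [G_sharp ('\n' :: t)]
      simp [pvFsplit, List.dropWhile, pvTk]
    · rw [G_sharp (c :: t)]
      have hdw : (c :: t).dropWhile (fun x => x != '\n') = t.dropWhile (fun x => x != '\n') := by
        rw [List.dropWhile_cons, if_pos (by simp [hc])]
      rw [hdw, ← ih, G_sharp t]
      obtain ⟨hd, tl, hft⟩ := mapTk_eq t
      simp [pvFsplit, hc, hft, List.modifyHead]

lemma loop_eq_G : ∀ l : List Char,
    cleanCommentsLoop l = PySem.Chars.join ['\n'] ((pvFsplit l).map pvTk) := by
  intro l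
  induction l using cleanCommentsLoop.induct with
  | case1 => simp [cleanCommentsLoop, pvFsplit, pvTk, PySem.Chars.join_singleton]
  | case2 rest ih =>
    rw [cleanCommentsLoop, if_pos rfl, ih, ← G_skip]
  | case3 c rest hc ih =>
    rw [cleanCommentsLoop, if_neg hc, ih]
    obtain ⟨hd, tl, hft⟩ := mapTk_eq rest
    by_cases hnl : c = '\n'
    · subst hnl
      rw [show pvFsplit ('\n' :: rest) = [] :: pvFsplit rest by simp [pvFsplit], hft]
      simp only [List.map_cons]
      rw [show pvTk ([] : List Char) = [] from rfl, PySem.Chars.join_cons_cons]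
      simp
    · have hfc : pvFsplit (c :: rest) = (c :: hd) :: tl := by
        simp [pvFsplit, hnl, hft, List.modifyHead]
      rw [hfc, List.map_cons, hft, List.map_cons]
      have htkc : pvTk (c :: hd) = c :: pvTk hd := by
        have hcb : (c != '#') = true := by simp [hc]
        simp [pvTk, List.takeWhile, hcb]
      rw [htkc, join_head_cons]

lemma alt_toList (s : String) :
    (clean_comments_alt s).toList
      = PySem.Chars.join ['\n'] ((pvFsplit s.toList).map pvTk) := by
  have hsep : ("\n" : String).toList = ['\n'] := by decide
  have hh : ("#" : String).toList = ['#'] := by decide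
  have hline : ∀ line : String,
      (if PySem.Str.find line "#" = -1 then line
       else PySem.Str.slice line none (some (PySem.Str.find line "#"))).toList
      = pvTk line.toList := by
    intro line
    by_cases h : PySem.Chars.find line.toList ['#'] = -1
    · rw [if_pos (by rw [PySem.Str.find_eq, hh]; exact h)]
      have hcut := cut_eq_takeWhile line.toList
      rw [if_pos h] at hcut
      simpa [pvTk] using hcut
    · rw [if_neg (by rw [PySem.Str.find_eq, hh]; exact h)]
      have hcut := cut_eq_takeWhile line.toList
      rw [if_neg h] at hcut
      rw [PySem.Str.toList_slice, PySem.Str.find_eq, hh]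
      simpa [pvTk] using hcut
  unfold clean_comments_alt
  rw [PySem.Str.toList_join]
  have hsplit : PySem.Str.split? s "\n"
      = some ((pvFsplit s.toList).map String.ofList) := by
    rw [PySem.Str.split?, PySem.Chars.split?, hsep]
    simp [splitOn_nl]
  rw [hsplit, hsep]
  simp only [Option.getD_some, List.map_map]
  apply congrArg
  apply List.map_congr_left
  intro cs _
  simp only [Function.comp_apply]
  rw [hline (String.ofList cs), String.toList_ofList]

-- ===== VERDICT (by name: the statement is the Claim_ definition above) =====
theorem clean_comments_spec : Claim_equal_clean_comments := by
  intro s _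
  unfold Spec_clean_comments clean_comments
  rw [loop_eq_G, ← alt_toList, String.ofList_toList]
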